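-- pv_equiv track=rewrite | github.com/bluesentinelsec/vigil | scripts/check_complexity.py | matching_override
-- ===== SOURCE A (Python) =====
-- def matching_override(overrides: list[dict], file_path: str) -> dict | None:
--     best = None
--     best_length = -1
--     for override in overrides:
--         exact_path = override.get("path")
--         prefix = override.get("path_prefix")
--         match_length = -1
--
--         if exact_path is not None and file_path == exact_path:
--             match_length = len(exact_path) + 100000
--         elif prefix is not None and file_path.startswith(prefix):
--             match_length = len(prefix)
--
--         if match_length > best_length:
--             best = override
--             best_length = match_length
--     return best
-- ===== SOURCE B (Python) =====
-- def matching_override(overrides: list[dict], file_path: str) -> dict | None: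
--     # pass 1: an exact "path" match always wins; the first one is returned
--     for override in overrides:
--         if override.get("path") == file_path:
--             return override
--     # pass 2: longest matching "path_prefix", first one on ties
--     best = None
--     best_len = -1
--     for override in overrides:
--         prefix = override.get("path_prefix")
--         if prefix is not None and file_path.startswith(prefix) and len(prefix) > best_len:
--             best = override
--             best_len = len(prefix)
--     return best
-- ===== Notes on version B (the rewrite author's own statement) =====
-- stated objective: simpler
-- what changed: Replaces the single sentinel-scored pass (match_length with a +100000 offset for exact matches) by two plain passes: first return the first exact 'path' match, otherwise track the longest matching 'path_prefix'.
import Mathlib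
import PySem

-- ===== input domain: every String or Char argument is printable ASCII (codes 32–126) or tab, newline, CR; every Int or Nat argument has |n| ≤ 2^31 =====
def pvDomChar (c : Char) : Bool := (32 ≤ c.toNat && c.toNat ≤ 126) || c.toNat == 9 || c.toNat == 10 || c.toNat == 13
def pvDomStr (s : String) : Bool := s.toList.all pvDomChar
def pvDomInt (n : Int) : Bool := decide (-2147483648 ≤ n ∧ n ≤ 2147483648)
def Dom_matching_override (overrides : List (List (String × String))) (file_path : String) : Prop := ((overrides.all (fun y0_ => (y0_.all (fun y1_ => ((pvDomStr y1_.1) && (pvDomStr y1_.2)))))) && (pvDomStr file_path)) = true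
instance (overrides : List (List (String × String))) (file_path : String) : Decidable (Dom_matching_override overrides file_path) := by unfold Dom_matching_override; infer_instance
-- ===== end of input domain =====

-- Same return value, simpler shape: A's single pass with sentinel arithmetic (+100000 for an
-- exact match) becomes two plain passes in B — first exact 'path' match, else longest 'path_prefix'.

-- shared helper: dict.get(k) on an association list (first match)
def pvGetV (d : List (String × String)) (k : String) : Option String :=
  match d with
  | [] => none
  | (k', v) :: rest => if k' == k then some v else pvGetV rest k

-- ===== PORT A =====
-- the 'elif prefix is not None and file_path.startswith(prefix)' arm of A's match_length
def pvPrefixScoreA (file_path : String) (pre : Option String) : Int :=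
  match pre with
  | some p => if PySem.Str.startswith file_path p then PySem.Str.len p else -1
  | none => -1

-- match_length of one override, exactly A's branch order
def pvScoreA (file_path : String) (o : List (String × String)) : Int :=
  match pvGetV o "path" with
  | some exact_path =>
    if file_path == exact_path then PySem.Str.len exact_path + 100000
    else pvPrefixScoreA file_path (pvGetV o "path_prefix")
  | none => pvPrefixScoreA file_path (pvGetV o "path_prefix")

-- A's loop body: keep the override iff match_length > best_length (strict)
def pvStepA (file_path : String) (st : Option (List (String × String)) × Int) (o : List (String × String)) : Option (List (String × String)) × Int :=
  let ml := pvScoreA file_path o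
  if ml > st.2 then (some o, ml) else st

def matching_override (overrides : List (List (String × String))) (file_path : String) : Option (List (String × String)) :=
  (overrides.foldl (pvStepA file_path) (none, -1)).1

-- ===== PORT B =====
-- B's first pass: first override whose 'path' equals file_path
def pvFindExact (file_path : String) : List (List (String × String)) → Option (List (String × String))
  | [] => none
  | o :: rest => if pvGetV o "path" == some file_path then some o else pvFindExact file_path rest

-- B's second pass body: longest matching 'path_prefix', first on ties
def pvStepB (file_path : String) (st : Option (List (String × String)) × Int) (o : List (String × String)) : Option (List (String × String)) × Int :=
  match pvGetV o "path_prefix" with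
  | some p =>
    if PySem.Str.startswith file_path p && decide (PySem.Str.len p > st.2)
    then (some o, PySem.Str.len p) else st
  | none => st

def matching_override_alt (overrides : List (List (String × String))) (file_path : String) : Option (List (String × String)) :=
  match pvFindExact file_path overrides with
  | some o => some o
  | none => (overrides.foldl (pvStepB file_path) (none, -1)).1

-- ===== PRECONDITION & SPEC =====
def Spec_matching_override (overrides : List (List (String × String))) (file_path : String) (out : Option (List (String × String))) : Prop := out = matching_override_alt overrides file_path
instance (overrides : List (List (String × String))) (file_path : String) (out : Option (List (String × String))) : Decidable (Spec_matching_override overrides file_path out) := by unfold Spec_matching_override; infer_instance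

-- ===== CLAIM (what is proved, stated in full; the proofs are below) =====
def Claim_equal_matching_override : Prop := ∀ (overrides : List (List (String × String))) (file_path : String), Dom_matching_override overrides file_path → Spec_matching_override overrides file_path (matching_override overrides file_path)

-- ===== LEMMAS AND PROOFS =====

theorem pvLen_nonneg (s : String) : 0 ≤ PySem.Str.len s := by
  rw [PySem.Str.len_eq]; positivity

theorem pvLen_le_of_startswith (fp p : String) (h : PySem.Str.startswith fp p = true) :
    PySem.Str.len p ≤ PySem.Str.len fp := by
  rw [PySem.Str.len_eq, PySem.Str.len_eq]
  have hpre : p.toList <+: fp.toList := by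
    rw [PySem.Str.startswith_eq] at h
    exact (PySem.Chars.startswith_iff _ _).mp h
  exact_mod_cast hpre.length_le

theorem pvPrefixScoreA_le (fp : String) (pre : Option String) :
    pvPrefixScoreA fp pre ≤ PySem.Str.len fp := by
  have h0 := pvLen_nonneg fp
  cases pre with
  | none => simp only [pvPrefixScoreA]; omega
  | some p =>
    simp only [pvPrefixScoreA]
    split_ifs with h
    · exact pvLen_le_of_startswith fp p h
    · omega

-- characterisation of A's match_length: exact match
theorem pvScoreA_eq_exact (fp : String) (o : List (String × String))
    (hget : pvGetV o "path" = some fp) :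
    pvScoreA fp o = PySem.Str.len fp + 100000 := by
  unfold pvScoreA
  rw [hget]
  show (if fp == fp then PySem.Str.len fp + 100000 else pvPrefixScoreA fp (pvGetV o "path_prefix")) = _
  rw [if_pos (beq_self_eq_true fp)]

-- characterisation of A's match_length: no exact match, prefix arm decides
theorem pvScoreA_eq_prefix (fp : String) (o : List (String × String))
    (hx : pvGetV o "path" ≠ some fp) :
    pvScoreA fp o = pvPrefixScoreA fp (pvGetV o "path_prefix") := by
  unfold pvScoreA
  cases hg : pvGetV o "path" with
  | none => rfl
  | some ep =>
    show (if fp == ep then PySem.Str.len ep + 100000 else pvPrefixScoreA fp (pvGetV o "path_prefix")) = _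
    rw [if_neg]
    intro hc
    exact hx (by rw [hg, beq_iff_eq.mp hc])

-- every score is at most len(file_path) + 100000
theorem pvScoreA_le (fp : String) (o : List (String × String)) :
    pvScoreA fp o ≤ PySem.Str.len fp + 100000 := by
  by_cases hx : pvGetV o "path" = some fp
  · rw [pvScoreA_eq_exact fp o hx]
  · rw [pvScoreA_eq_prefix fp o hx]
    have := pvPrefixScoreA_le fp (pvGetV o "path_prefix"); omega

-- once the best score is maximal, A's fold never updates
theorem pvFoldA_stay (fp : String) (l : List (List (String × String))) (b : Option (List (String × String))) :
    l.foldl (pvStepA fp) (b, PySem.Str.len fp + 100000) = (b, PySem.Str.len fp + 100000) := by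
  induction l with
  | nil => rfl
  | cons o l ih =>
    have h := pvScoreA_le fp o
    simp only [List.foldl_cons, pvStepA]
    rw [if_neg (not_lt.mpr h)]
    exact ih

-- with an exact match present, A's fold returns the first one
theorem pvFoldA_exact (fp : String) (l : List (List (String × String)))
    (o : List (String × String)) (st : Option (List (String × String)) × Int)
    (hlt : st.2 < PySem.Str.len fp + 100000)
    (h : pvFindExact fp l = some o) :
    (l.foldl (pvStepA fp) st).1 = some o := by
  induction l generalizing st with
  | nil => simp [pvFindExact] at h
  | cons o' l ih =>
    rw [pvFindExact] at h
    by_cases hx : pvGetV o' "path" == some fp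
    · rw [if_pos hx] at h
      injection h with h; subst h
      have hget : pvGetV o' "path" = some fp := beq_iff_eq.mp hx
      simp only [List.foldl_cons, pvStepA, pvScoreA_eq_exact fp o' hget]
      rw [if_pos (by omega)]
      rw [pvFoldA_stay]
    · rw [if_neg hx] at h
      have hne : pvGetV o' "path" ≠ some fp := fun hc => hx (beq_iff_eq.mpr hc)
      have hle : pvScoreA fp o' ≤ PySem.Str.len fp := by
        rw [pvScoreA_eq_prefix fp o' hne]; exact pvPrefixScoreA_le fp _
      simp only [List.foldl_cons]
      refine ih _ ?_ h
      simp only [pvStepA]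
      split_ifs with hgt
      · exact lt_of_le_of_lt hle (by omega)
      · exact hlt

-- on a non-exact override, with best_length ≥ -1, A's step and B's step agree
theorem pvStepA_eq_stepB (fp : String) (st : Option (List (String × String)) × Int)
    (o : List (String × String)) (hst : -1 ≤ st.2)
    (hx : pvGetV o "path" ≠ some fp) : pvStepA fp st o = pvStepB fp st o := by
  simp only [pvStepA, pvStepB, pvScoreA_eq_prefix fp o hx]
  cases hp : pvGetV o "path_prefix" with
  | none =>
    simp only [pvPrefixScoreA]
    rw [if_neg (by omega)]
  | some p =>
    simp only [pvPrefixScoreA]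
    by_cases hsw : PySem.Str.startswith fp p
    · rw [if_pos hsw]
      by_cases hgt : PySem.Str.len p > st.2
      · rw [if_pos hgt, if_pos (by simp only [hsw, Bool.true_and, decide_eq_true_eq]; exact hgt)]
      · rw [if_neg hgt, if_neg (by simp only [hsw, Bool.true_and, decide_eq_true_eq]; exact hgt)]
    · rw [if_neg hsw, if_neg (by omega), if_neg (by simp only [Bool.and_eq_true, decide_eq_true_eq]; rintro ⟨h1, _⟩; exact hsw h1)]

theorem pvStepA_snd_ge (fp : String) (st : Option (List (String × String)) × Int)
    (o : List (String × String)) (hst : -1 ≤ st.2) : -1 ≤ (pvStepA fp st o).2 := by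
  simp only [pvStepA]
  split_ifs with h
  · exact le_of_lt (lt_of_le_of_lt hst h)
  · exact hst

-- with no exact match, A's fold and B's second pass run in lockstep
theorem pvFoldA_eq_foldB (fp : String) (l : List (List (String × String)))
    (st : Option (List (String × String)) × Int) (hst : -1 ≤ st.2)
    (h : pvFindExact fp l = none) :
    l.foldl (pvStepA fp) st = l.foldl (pvStepB fp) st := by
  induction l generalizing st with
  | nil => rfl
  | cons o l ih =>
    rw [pvFindExact] at h
    by_cases hx : pvGetV o "path" == some fp
    · rw [if_pos hx] at h; exact absurd h (by simp)
    · rw [if_neg hx] at h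
      have hne : pvGetV o "path" ≠ some fp := fun hc => hx (beq_iff_eq.mpr hc)
      simp only [List.foldl_cons]
      rw [← pvStepA_eq_stepB fp st o hst hne]
      exact ih _ (pvStepA_snd_ge fp st o hst) h

-- ===== VERDICT (by name: the statement is the Claim_ definition above) =====
theorem matching_override_spec : Claim_equal_matching_override := by
  intro overrides fp _
  unfold Spec_matching_override matching_override matching_override_alt
  cases h : pvFindExact fp overrides with
  | some o =>
      exact pvFoldA_exact fp overrides o (none, -1)
        (by have := pvLen_nonneg fp; show (-1 : Int) < PySem.Str.len fp + 100000; omega) h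
  | none =>
      rw [pvFoldA_eq_foldB fp overrides (none, -1) (by norm_num) h]
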